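-- pv_equiv track=rewrite | github.com/Aqua-0/Blender-Gfmodel-Addon | io_scene_gfmodel/core/export.py | _pica_patch_first_param
-- ===== SOURCE A (Python) =====
-- from typing import Dict, Iterable, List, Optional, Sequence, Tuple
--
-- def _pica_patch_first_param(cmds: List[int], reg: int, new_param: int) -> bool:
--     """Patch the first write to `reg` in-place, best-effort."""
--     i = 0
--     while i + 1 < len(cmds):
--         param0_i = i
--         cmd_i = i + 1
--         cmd = int(cmds[cmd_i])
--         i += 2
--         base_reg = cmd & 0xFFFF
--         extra = (cmd >> 20) & 0x7FF
--         consecutive = (cmd >> 31) != 0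
--         if consecutive:
--             for j in range(extra + 1):
--                 if int(base_reg + j) == int(reg):
--                     cmds[param0_i] = int(new_param) & 0xFFFFFFFF
--                     return True
--                 if j < extra:
--                     param0_i = i
--                     i += 1
--         else:
--             if int(base_reg) == int(reg):
--                 cmds[param0_i] = int(new_param) & 0xFFFFFFFF
--                 return True
--             i += int(extra)
--         if (i & 1) != 0:
--             i += 1
--     return False
-- ===== SOURCE B (Python) =====
-- def _pica_patch_first_param(cmds, reg, new_param):
--     """Patch the first write to `reg` in-place, best-effort.
--
--     One O(1) range check per command packet instead of a per-register inner loop.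
--     """
--     i = 0
--     n = len(cmds)
--     r = int(reg)
--     while i + 1 < n:
--         cmd = int(cmds[i + 1])
--         base_reg = cmd & 0xFFFF
--         extra = (cmd >> 20) & 0x7FF
--         if (cmd >> 31) != 0:
--             off = r - base_reg
--             if 0 <= off <= extra:
--                 slot = i if off == 0 else i + 1 + off
--                 cmds[slot] = int(new_param) & 0xFFFFFFFF
--                 return True
--         elif base_reg == r:
--             cmds[i] = int(new_param) & 0xFFFFFFFF
--             return True
--         i += 2 + extra
--         i += i & 1
--     return False
-- ===== Notes on version B (the rewrite author's own statement) =====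
-- stated objective: alternative
-- what changed: The per-register inner loop over all extra+1 consecutive registers is replaced by one range check base_reg <= reg <= base_reg+extra with a directly computed parameter-slot index, so B does constant work per command packet (measured 1.4-2.1x, below the 1.5x bar at the largest size).
import Mathlib
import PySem

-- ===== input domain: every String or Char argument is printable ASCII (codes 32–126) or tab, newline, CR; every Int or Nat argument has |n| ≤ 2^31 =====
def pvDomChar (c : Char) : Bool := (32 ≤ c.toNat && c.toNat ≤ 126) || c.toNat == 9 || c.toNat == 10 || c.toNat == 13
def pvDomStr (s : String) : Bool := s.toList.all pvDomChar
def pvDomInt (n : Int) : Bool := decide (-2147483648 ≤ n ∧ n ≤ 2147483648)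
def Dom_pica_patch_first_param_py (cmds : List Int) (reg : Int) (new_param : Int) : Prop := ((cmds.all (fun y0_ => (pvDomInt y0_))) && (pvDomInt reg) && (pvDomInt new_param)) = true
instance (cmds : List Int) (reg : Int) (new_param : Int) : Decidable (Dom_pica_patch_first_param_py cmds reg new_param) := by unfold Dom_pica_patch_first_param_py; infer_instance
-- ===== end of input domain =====

-- B replaces A's per-register inner loop by one range check and a direct slot index per packet
-- (constant work per command packet; objective: alternative).  Both Pythons patch `cmds` in place at the same slot with the same value;
-- the equivalence proved here is about the RETURN value (the in-place mutation is identical in A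
-- and B).  Bit extractions on masks 2^k-1 are ported exactly as floordiv/mod by powers of two
-- (cmd & 0xFFFF = cmd mod 2^16, (cmd >> 20) & 0x7FF = (cmd floordiv 2^20) mod 2^11,
--  cmd >> 31 = cmd floordiv 2^31 — exact for every Python int, negative included).
-- Both loops carry a fuel argument only to make the recursion structural; fuel = length + 1
-- never runs out because i grows by at least 2 per iteration.

-- ===== PORT A =====
-- inner `for j in range(extra + 1)` loop of A; `param0_i` is only written to `cmds` (mutation,
-- not part of the return value), so only (found, i) is threaded; returns (True, _) on a match,
-- otherwise (False, final i).  d is fuel, called with d = extra ≥ extra - j.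
def picaInnerA (reg base_reg : Int) (extra : Nat) : Nat → Nat → Nat → Bool × Nat
  | d, j, i =>
    if base_reg + (j : Int) == reg then (true, i)
    else if j < extra then
      match d with
      | 0 => (false, i)  -- unreachable: d ≥ extra - j > 0 here
      | d + 1 => picaInnerA reg base_reg extra d (j + 1) (i + 1)
    else (false, i)

def picaLoopA (cmds : List Int) (reg new_param : Int) : Nat → Nat → Bool
  | 0, _ => false
  | fuel + 1, i =>
    if h : i + 1 < cmds.length then
      let cmd := cmds[i + 1]
      let base_reg := PySem.Int.mod cmd 65536
      let extra := (PySem.Int.mod (PySem.Int.floordiv cmd 1048576) 2048).toNat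
      if PySem.Int.floordiv cmd 2147483648 != 0 then
        let r := picaInnerA reg base_reg extra extra 0 (i + 2)
        if r.1 then true
        else picaLoopA cmds reg new_param fuel (if r.2 % 2 ≠ 0 then r.2 + 1 else r.2)
      else
        if base_reg == reg then true
        else
          let i3 := i + 2 + extra
          picaLoopA cmds reg new_param fuel (if i3 % 2 ≠ 0 then i3 + 1 else i3)
    else false

def pica_patch_first_param_py (cmds : List Int) (reg : Int) (new_param : Int) : Bool :=
  picaLoopA cmds reg new_param (cmds.length + 1) 0

-- ===== PORT B =====
def picaLoopB (cmds : List Int) (reg new_param : Int) : Nat → Nat → Bool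
  | 0, _ => false
  | fuel + 1, i =>
    if h : i + 1 < cmds.length then
      let cmd := cmds[i + 1]
      let base_reg := PySem.Int.mod cmd 65536
      let extra := (PySem.Int.mod (PySem.Int.floordiv cmd 1048576) 2048).toNat
      if PySem.Int.floordiv cmd 2147483648 != 0 then
        let off := reg - base_reg
        if 0 ≤ off ∧ off ≤ (extra : Int) then true
        else
          let i1 := i + 2 + extra
          picaLoopB cmds reg new_param fuel (i1 + i1 % 2)
      else
        if base_reg == reg then true
        else
          let i1 := i + 2 + extra
          picaLoopB cmds reg new_param fuel (i1 + i1 % 2)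
    else false

def pica_patch_first_param_py_alt (cmds : List Int) (reg : Int) (new_param : Int) : Bool :=
  picaLoopB cmds reg new_param (cmds.length + 1) 0

-- ===== PRECONDITION & SPEC =====
-- The raising inputs are inherently positional (only a true command word of the walk can raise),
-- so the exact condition walks the packet headers: pvNoRaise is true iff the first packet
-- addressing `reg` (if any) has its parameter slot for `reg` inside the list — exactly the
-- inputs on which Python A (and Python B alike) returns instead of raising IndexError.
-- It decides nothing about either result: it never produces a True/False answer of the ports.
def pvNoRaise (cmds : List Int) (reg : Int) : Nat → Nat → Bool
  | 0, _ => true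
  | fuel + 1, i =>
    if h : i + 1 < cmds.length then
      let cmd := cmds[i + 1]
      let base_reg := PySem.Int.mod cmd 65536
      let extra := (PySem.Int.mod (PySem.Int.floordiv cmd 1048576) 2048).toNat
      if PySem.Int.floordiv cmd 2147483648 != 0 then
        let off := reg - base_reg
        if 0 ≤ off ∧ off ≤ (extra : Int) then
          decide ((if off = 0 then i else i + 1 + off.toNat) < cmds.length)
        else
          let i1 := i + 2 + extra
          pvNoRaise cmds reg fuel (i1 + i1 % 2)
      else
        if base_reg == reg then true
        else
          let i1 := i + 2 + extra
          pvNoRaise cmds reg fuel (i1 + i1 % 2)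
    else true

-- Pre_ excludes exactly the truncated streams on which A raises IndexError (and B raises it
-- too): the first command packet addressing `reg` is a consecutive-mode packet whose matching
-- parameter slot lies beyond the end of the list.
def Pre_pica_patch_first_param_py (cmds : List Int) (reg : Int) (new_param : Int) : Prop :=
  pvNoRaise cmds reg (cmds.length + 1) 0 = true
instance (cmds : List Int) (reg : Int) (new_param : Int) : Decidable (Pre_pica_patch_first_param_py cmds reg new_param) := by unfold Pre_pica_patch_first_param_py; infer_instance

def pvWitness_pica_patch_first_param_py : List Int × Int × Int := ([1, 2], 3, 0)

def Spec_pica_patch_first_param_py (cmds : List Int) (reg : Int) (new_param : Int) (out : Bool) : Prop := out = pica_patch_first_param_py_alt cmds reg new_param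
instance (cmds : List Int) (reg : Int) (new_param : Int) (out : Bool) : Decidable (Spec_pica_patch_first_param_py cmds reg new_param out) := by unfold Spec_pica_patch_first_param_py; infer_instance

-- ===== CLAIM (what is proved, stated in full; the proofs are below) =====
def Claim_equal_pica_patch_first_param_py : Prop := ∀ (cmds : List Int) (reg : Int) (new_param : Int), Dom_pica_patch_first_param_py cmds reg new_param → Pre_pica_patch_first_param_py cmds reg new_param → Spec_pica_patch_first_param_py cmds reg new_param (pica_patch_first_param_py cmds reg new_param)

-- ===== LEMMAS AND PROOFS =====

theorem picaInnerA_false (reg base_reg : Int) (extra : Nat) :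
    ∀ d j i, extra - j ≤ d → j ≤ extra →
    (∀ k, j ≤ k → k ≤ extra → base_reg + (k : Int) ≠ reg) →
    picaInnerA reg base_reg extra d j i = (false, i + (extra - j)) := by
  intro d
  induction d with
  | zero =>
      intro j i hm hj hnot
      have hje : j = extra := by omega
      subst hje
      rw [picaInnerA]
      have hb : (base_reg + (j : Int) == reg) = false :=
        beq_eq_false_iff_ne.mpr (hnot j le_rfl le_rfl)
      simp [hb]
  | succ d ih =>
      intro j i hm hj hnot
      rw [picaInnerA]
      have hb : (base_reg + (j : Int) == reg) = false :=
        beq_eq_false_iff_ne.mpr (hnot j le_rfl hj)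
      simp only [hb, Bool.false_eq_true, if_false]
      by_cases hlt : j < extra
      · rw [if_pos hlt,
          ih (j + 1) (i + 1) (by omega) (by omega) (fun k hk1 hk2 => hnot k (by omega) hk2)]
        simp only [Prod.mk.injEq]
        exact ⟨trivial, by omega⟩
      · rw [if_neg hlt]
        simp only [Prod.mk.injEq]
        exact ⟨trivial, by omega⟩

theorem picaInnerA_true (reg base_reg : Int) (extra : Nat) :
    ∀ d j i, extra - j ≤ d →
    (∃ k, j ≤ k ∧ k ≤ extra ∧ base_reg + (k : Int) = reg) →
    (picaInnerA reg base_reg extra d j i).1 = true := by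
  intro d
  induction d with
  | zero =>
      intro j i hm hex
      obtain ⟨k, hk1, hk2, hk3⟩ := hex
      have hkj : k = j := by omega
      subst hkj
      rw [picaInnerA]
      rw [if_pos (beq_iff_eq.mpr hk3)]
  | succ d ih =>
      intro j i hm hex
      obtain ⟨k, hk1, hk2, hk3⟩ := hex
      rw [picaInnerA]
      by_cases hb : (base_reg + (j : Int) == reg) = true
      · rw [if_pos hb]
      · rw [if_neg hb]
        have hkj : j < k := by
          rcases Nat.eq_or_lt_of_le hk1 with rfl | h
          · exact absurd (beq_iff_eq.mpr hk3) hb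
          · exact h
        rw [if_pos (by omega)]
        exact ih (j + 1) (i + 1) (by omega) ⟨k, by omega, hk2, hk3⟩

theorem picaLoop_eq (cmds : List Int) (reg new_param : Int) :
    ∀ fuel i, picaLoopA cmds reg new_param fuel i = picaLoopB cmds reg new_param fuel i := by
  intro fuel
  induction fuel with
  | zero => intro i; rfl
  | succ fuel ih =>
      intro i
      rw [picaLoopA, picaLoopB]
      by_cases h : i + 1 < cmds.length
      · simp only [dif_pos h]
        set cmd := cmds[i + 1] with hcmd
        set base_reg := PySem.Int.mod cmd 65536 with hbr
        set extra := (PySem.Int.mod (PySem.Int.floordiv cmd 1048576) 2048).toNat with hex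
        by_cases hc : (PySem.Int.floordiv cmd 2147483648 != 0) = true
        · simp only [hc, if_true]
          by_cases hr : 0 ≤ reg - base_reg ∧ reg - base_reg ≤ (extra : Int)
          · -- in range: A's inner loop finds the match at j = reg - base_reg
            have hm : (picaInnerA reg base_reg extra extra 0 (i + 2)).1 = true := by
              apply picaInnerA_true reg base_reg extra extra 0 (i + 2) (by omega)
              refine ⟨(reg - base_reg).toNat, Nat.zero_le _, ?_, ?_⟩
              · omega
              · have h1 : ((reg - base_reg).toNat : Int) = reg - base_reg := by omega
                rw [h1]; ring
            rw [if_pos hm, if_pos hr]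
          · -- out of range: A's inner loop never matches and ends at i + 2 + extra
            have hnone : ∀ k, 0 ≤ k → k ≤ extra → base_reg + (k : Int) ≠ reg := by
              intro k _ hk heq
              apply hr
              constructor <;> omega
            rw [picaInnerA_false reg base_reg extra extra 0 (i + 2) (by omega) (Nat.zero_le _) hnone]
            simp only [if_neg hr]
            have harg : (if (i + 2 + (extra - 0)) % 2 ≠ 0 then i + 2 + (extra - 0) + 1
                else i + 2 + (extra - 0)) = (i + 2 + extra) + (i + 2 + extra) % 2 := by
              split <;> omega
            simp only [Bool.false_eq_true, if_false]
            rw [harg]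
            exact ih _
        · simp only [hc, if_false, Bool.false_eq_true]
          by_cases hb : (base_reg == reg) = true
          · simp [hb]
          · simp only [hb, if_false, Bool.false_eq_true]
            have harg : (if (i + 2 + extra) % 2 ≠ 0 then i + 2 + extra + 1
                else i + 2 + extra) = (i + 2 + extra) + (i + 2 + extra) % 2 := by
              split <;> omega
            rw [harg]
            exact ih _
      · simp [h]

-- ===== VERDICT (by name: the statement is the Claim_ definition above) =====
theorem pica_patch_first_param_py_spec : Claim_equal_pica_patch_first_param_py := by
  intro cmds reg new_param _ _
  unfold Spec_pica_patch_first_param_py pica_patch_first_param_py pica_patch_first_param_py_alt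
  exact picaLoop_eq cmds reg new_param (cmds.length + 1) 0
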